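-- pv_equiv track=rewrite | github.com/mik11231/python | advent2020/Day14/day14.py | run_v1
-- ===== SOURCE A (Python) =====
-- def run_v1(program: list[tuple[str, ...]]) -> dict[int, int]:
--     """Execute the program with version-1 (value masking) semantics."""
--     memory: dict[int, int] = {}
--     or_mask = 0
--     and_mask = (1 << 36) - 1
--
--     for instr in program:
--         if instr[0] == "mask":
--             mask_str = instr[1]
--             or_mask = int(mask_str.replace("X", "0"), 2)
--             and_mask = int(mask_str.replace("X", "1"), 2)
--         else:
--             addr = int(instr[1])
--             val = int(instr[2])
--             memory[addr] = (val | or_mask) & and_mask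
--
--     return memory
-- ===== SOURCE B (Python) =====
-- def run_v1(program):
--     """Execute the program with version-1 (value masking) semantics.
--
--     Keeps the mask as its raw string; each write rebuilds the stored value by
--     walking the mask characters from the least-significant end, peeling one
--     bit of the value per step with divmod (no precomputed integer masks).
--     """
--     memory = {}
--     mask = "X" * 36
--     for instr in program:
--         if instr[0] == "mask":
--             mask = instr[1]
--         else:
--             addr = int(instr[1])
--             v = int(instr[2])
--             result = 0
--             p = 1
--             for m in reversed(mask):
--                 v, bit = divmod(v, 2)
--                 if m != "X":
--                     bit = int(m)
--                 result += bit * p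
--                 p *= 2
--             memory[addr] = result
--     return memory
-- ===== Notes on version B (the rewrite author's own statement) =====
-- stated objective: alternative
-- what changed: B drops A's precomputed integer or/and masks and the O(1) bitwise apply: it stores the mask as its raw string and, on each write, walks the mask characters from the least-significant end, peeling one bit of the value per step with divmod and summing the selected bits back into an integer.
-- outside the precondition, e.g. on run_v1([('mask', '1_0'), ('mem', '0', '1')]): A returns {0: 2}, B raises ValueError
import Mathlib
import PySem

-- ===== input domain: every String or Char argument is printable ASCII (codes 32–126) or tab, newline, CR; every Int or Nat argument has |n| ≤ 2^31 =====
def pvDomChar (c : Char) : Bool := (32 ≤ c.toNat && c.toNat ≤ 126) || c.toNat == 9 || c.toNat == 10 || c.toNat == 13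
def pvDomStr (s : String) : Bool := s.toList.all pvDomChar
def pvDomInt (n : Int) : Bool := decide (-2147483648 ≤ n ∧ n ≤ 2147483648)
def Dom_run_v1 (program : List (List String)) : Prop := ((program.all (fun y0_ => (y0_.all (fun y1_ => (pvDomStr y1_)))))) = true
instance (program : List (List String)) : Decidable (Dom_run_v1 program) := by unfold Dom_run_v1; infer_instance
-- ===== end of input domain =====

-- ===== PORT A =====
-- B re-implements A's masked-write loop bit by bit over the raw mask string (objective: alternative
-- formulation, no speed claim); proved equal to A on Pre_run_v1.

-- hand port of Python's int(s, 2): a binary-digit fold. Exact on the strings Pre_run_v1 admits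
-- (nonempty, characters '0'/'1' only, which is all A ever parses inside Pre_): no sign, no
-- whitespace, no underscores, no prefix to handle there.
def pvParseBin (s : String) : Int :=
  s.toList.foldl (fun a c => 2 * a + (if c == '1' then 1 else 0)) 0

-- one instruction of A: state = (memory, or_mask, and_mask)
def pvStepA (st : PySem.Dict Int Int × Int × Int) (instr : List String) :
    PySem.Dict Int Int × Int × Int :=
  let memory := st.1
  let or_mask := st.2.1
  let and_mask := st.2.2
  -- instr[0] / instr[1] / instr[2]: pyGet? is none exactly where Python raises IndexError;
  -- Pre_run_v1 excludes those inputs, so the .getD default is never reached on admitted inputs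
  -- (likewise .getD 0 after ofStr?, whose none is Python's ValueError).
  if (PySem.List.pyGet? instr 0).getD "" = "mask" then
    let mask_str := (PySem.List.pyGet? instr 1).getD ""
    (memory, pvParseBin (PySem.Str.replace mask_str "X" "0"),
      pvParseBin (PySem.Str.replace mask_str "X" "1"))
  else
    let addr := (PySem.Int.ofStr? ((PySem.List.pyGet? instr 1).getD "")).getD 0
    let val := (PySem.Int.ofStr? ((PySem.List.pyGet? instr 2).getD "")).getD 0
    (memory.insert addr (PySem.Int.band (PySem.Int.bor val or_mask) and_mask), or_mask, and_mask)

def run_v1 (program : List (List String)) : List (Int × Int) :=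
  (program.foldl pvStepA (PySem.Dict.empty, 0, ((1 : Int) <<< (36 : Nat)) - 1)).1.items

-- ===== PORT B =====
-- one mask character of B's inner loop: state = (v, result, p)
def pvWriteStep (acc : Int × Int × Int) (m : Char) : Int × Int × Int :=
  let v := acc.1
  let result := acc.2.1
  let p := acc.2.2
  let vb := (PySem.Int.divmod? v 2).getD (0, 0)   -- divmod(v, 2); divisor 2 ≠ 0, never none
  -- int(m): none is Python's ValueError, excluded by Pre_run_v1 (mask chars are '0'/'1'/'X')
  let bit := if m ≠ 'X' then (PySem.Int.ofStr? (String.ofList [m])).getD 0 else vb.2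
  (vb.1, result + bit * p, p * 2)

-- B's per-write loop: for m in reversed(mask): ...
def pvApplyMask (mask : String) (v : Int) : Int :=
  (mask.toList.reverse.foldl pvWriteStep (v, 0, 1)).2.1

-- one instruction of B: state = (memory, mask string)
def pvStepB (st : PySem.Dict Int Int × String) (instr : List String) :
    PySem.Dict Int Int × String :=
  let memory := st.1
  let mask := st.2
  if (PySem.List.pyGet? instr 0).getD "" = "mask" then
    (memory, (PySem.List.pyGet? instr 1).getD "")
  else
    let addr := (PySem.Int.ofStr? ((PySem.List.pyGet? instr 1).getD "")).getD 0
    let v := (PySem.Int.ofStr? ((PySem.List.pyGet? instr 2).getD "")).getD 0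
    (memory.insert addr (pvApplyMask mask v), mask)

def run_v1_alt (program : List (List String)) : List (Int × Int) :=
  (program.foldl pvStepB (PySem.Dict.empty, String.ofList (List.replicate 36 'X'))).1.items

-- ===== PRECONDITION & SPEC =====
-- Pre_run_v1 admits the programs A executes without an exception, except that mask strings are
-- required to be nonempty words over '0'/'1'/'X' exactly: Python's int(mask, 2) additionally
-- tolerates whitespace, a sign and underscores inside the mask, an accident of parsing with int
-- on which B's character walk raises ValueError, so those masks are excluded (see the cite).
def Pre_run_v1 (program : List (List String)) : Prop :=
  ∀ instr ∈ program, 2 ≤ instr.length ∧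
    (if instr.headD "" = "mask"
     then (instr.getD 1 "").toList ≠ [] ∧
          (instr.getD 1 "").toList.all (fun c => c == '0' || c == '1' || c == 'X') = true
     else 3 ≤ instr.length ∧ (PySem.Int.ofStr? (instr.getD 1 "")).isSome ∧
          (PySem.Int.ofStr? (instr.getD 2 "")).isSome)

instance (program : List (List String)) : Decidable (Pre_run_v1 program) := by
  unfold Pre_run_v1; infer_instance

def pvWitness_run_v1 : List (List String) :=
  [["mask", "X1"], ["mem", "3", "-5"]]

def Spec_run_v1 (program : List (List String)) (out : List (Int × Int)) : Prop := out = run_v1_alt program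
instance (program : List (List String)) (out : List (Int × Int)) : Decidable (Spec_run_v1 program out) := by unfold Spec_run_v1; infer_instance

-- ===== CLAIM (what is proved, stated in full; the proofs are below) =====
def Claim_equal_run_v1 : Prop := ∀ (program : List (List String)), Dom_run_v1 program → Pre_run_v1 program → Spec_run_v1 program (run_v1 program)

-- ===== LEMMAS AND PROOFS =====

-- Nat-level parity decomposition of &&& and |||
theorem pvNatLand2 (m n r s : Nat) (hr : r < 2) (hs : s < 2) :
    (2 * m + r) &&& (2 * n + s) = 2 * (m &&& n) + (r &&& s) := by
  interval_cases r <;> interval_cases s <;>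
  · apply Nat.eq_of_testBit_eq
    intro k
    cases k with
    | zero => simp [Nat.testBit_zero]
    | succ k => simp [Nat.testBit_succ, Nat.and_div_two, Nat.mul_add_div]

theorem pvNatLor2 (m n r s : Nat) (hr : r < 2) (hs : s < 2) :
    (2 * m + r) ||| (2 * n + s) = 2 * (m ||| n) + (r ||| s) := by
  interval_cases r <;> interval_cases s <;>
  · apply Nat.eq_of_testBit_eq
    intro k
    cases k with
    | zero => simp [Nat.testBit_zero]
    | succ k => simp [Nat.testBit_succ, Nat.or_div_two, Nat.mul_add_div]

-- the mixed-sign branches of PySem's band/bor, as rewrite rules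
theorem pvBandPN (a b : Int) (ha : 0 ≤ a) (hb : b < 0) :
    PySem.Int.band a b = ((a.toNat - (a.toNat &&& (-b - 1).toNat) : Nat) : Int) := by
  simp only [PySem.Int.band]; rw [if_pos ha, if_neg (by omega)]

theorem pvBandNP (a b : Int) (ha : a < 0) (hb : 0 ≤ b) :
    PySem.Int.band a b = ((b.toNat - (b.toNat &&& (-a - 1).toNat) : Nat) : Int) := by
  simp only [PySem.Int.band]; rw [if_neg (by omega), if_pos hb]

theorem pvBandNN (a b : Int) (ha : a < 0) (hb : b < 0) :
    PySem.Int.band a b = -(((-a - 1).toNat ||| (-b - 1).toNat : Nat) : Int) - 1 := by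
  simp only [PySem.Int.band]; rw [if_neg (by omega), if_neg (by omega)]

theorem pvBorPN (a b : Int) (ha : 0 ≤ a) (hb : b < 0) :
    PySem.Int.bor a b = -(((-b - 1).toNat - ((-b - 1).toNat &&& a.toNat) : Nat) : Int) - 1 := by
  simp only [PySem.Int.bor]; rw [if_pos ha, if_neg (by omega)]

theorem pvBorNP (a b : Int) (ha : a < 0) (hb : 0 ≤ b) :
    PySem.Int.bor a b = -(((-a - 1).toNat - ((-a - 1).toNat &&& b.toNat) : Nat) : Int) - 1 := by
  simp only [PySem.Int.bor]; rw [if_neg (by omega), if_pos hb]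

theorem pvBorNN (a b : Int) (ha : a < 0) (hb : b < 0) :
    PySem.Int.bor a b = -(((-a - 1).toNat &&& (-b - 1).toNat : Nat) : Int) - 1 := by
  simp only [PySem.Int.bor]; rw [if_neg (by omega), if_neg (by omega)]

-- Int-level parity decomposition of Python's & and |
theorem pvBand2 (x y r s : Int) (hr : r = 0 ∨ r = 1) (hs : s = 0 ∨ s = 1) :
    PySem.Int.band (2 * x + r) (2 * y + s) = 2 * PySem.Int.band x y + PySem.Int.band r s := by
  have hll : ∀ m n : Nat, m &&& n ≤ m := fun m n => Nat.and_le_left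
  rcases le_or_gt 0 x with hx | hx <;> rcases le_or_gt 0 y with hy | hy
  · rw [PySem.Int.band_of_nonneg (by omega) (by omega), PySem.Int.band_of_nonneg hx hy,
        PySem.Int.band_of_nonneg (by omega : (0:Int) ≤ r) (by omega : (0:Int) ≤ s)]
    have e1 : (2 * x + r).toNat = 2 * x.toNat + r.toNat := by omega
    have e2 : (2 * y + s).toNat = 2 * y.toNat + s.toNat := by omega
    rw [e1, e2, pvNatLand2 _ _ _ _ (by omega) (by omega)]
    have := hll x.toNat y.toNat
    have := hll r.toNat s.toNat
    omega
  · rw [pvBandPN _ _ (by omega) (by omega), pvBandPN x y hx hy,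
        PySem.Int.band_of_nonneg (by omega : (0:Int) ≤ r) (by omega : (0:Int) ≤ s)]
    have e1 : (2 * x + r).toNat = 2 * x.toNat + r.toNat := by omega
    have e2 : (-(2 * y + s) - 1).toNat = 2 * (-y - 1).toNat + (1 - s).toNat := by omega
    rw [e1, e2, pvNatLand2 _ _ _ _ (by omega) (by omega)]
    have := hll x.toNat (-y - 1).toNat
    have := hll r.toNat (1 - s).toNat
    have := hll r.toNat s.toNat
    have hbits : (r.toNat &&& s.toNat) + (r.toNat &&& (1 - s).toNat) = r.toNat := by
      rcases hr with rfl | rfl <;> rcases hs with rfl | rfl <;> decide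
    omega
  · rw [pvBandNP _ _ (by omega) (by omega), pvBandNP x y hx hy,
        PySem.Int.band_of_nonneg (by omega : (0:Int) ≤ r) (by omega : (0:Int) ≤ s)]
    have e1 : (2 * y + s).toNat = 2 * y.toNat + s.toNat := by omega
    have e2 : (-(2 * x + r) - 1).toNat = 2 * (-x - 1).toNat + (1 - r).toNat := by omega
    rw [e1, e2, pvNatLand2 _ _ _ _ (by omega) (by omega)]
    have := hll y.toNat (-x - 1).toNat
    have := hll s.toNat (1 - r).toNat
    have := hll r.toNat s.toNat
    have hbits : (r.toNat &&& s.toNat) + (s.toNat &&& (1 - r).toNat) = s.toNat := by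
      rcases hr with rfl | rfl <;> rcases hs with rfl | rfl <;> decide
    have hcomm : s.toNat &&& r.toNat = r.toNat &&& s.toNat := Nat.and_comm _ _
    omega
  · rw [pvBandNN _ _ (by omega) (by omega), pvBandNN x y hx hy,
        PySem.Int.band_of_nonneg (by omega : (0:Int) ≤ r) (by omega : (0:Int) ≤ s)]
    have e1 : (-(2 * x + r) - 1).toNat = 2 * (-x - 1).toNat + (1 - r).toNat := by omega
    have e2 : (-(2 * y + s) - 1).toNat = 2 * (-y - 1).toNat + (1 - s).toNat := by omega
    rw [e1, e2, pvNatLor2 _ _ _ _ (by omega) (by omega)]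
    have hbits : ((1 - r).toNat ||| (1 - s).toNat) = 1 - (r.toNat &&& s.toNat) := by
      rcases hr with rfl | rfl <;> rcases hs with rfl | rfl <;> decide
    have := hll r.toNat s.toNat
    omega

theorem pvBor2 (x y r s : Int) (hr : r = 0 ∨ r = 1) (hs : s = 0 ∨ s = 1) :
    PySem.Int.bor (2 * x + r) (2 * y + s) = 2 * PySem.Int.bor x y + PySem.Int.bor r s := by
  have hll : ∀ m n : Nat, m &&& n ≤ m := fun m n => Nat.and_le_left
  have hor1 : (r.toNat ||| s.toNat) ≤ 1 := by
    rcases hr with rfl | rfl <;> rcases hs with rfl | rfl <;> decide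
  rcases le_or_gt 0 x with hx | hx <;> rcases le_or_gt 0 y with hy | hy
  · rw [PySem.Int.bor_of_nonneg (by omega) (by omega), PySem.Int.bor_of_nonneg hx hy,
        PySem.Int.bor_of_nonneg (by omega : (0:Int) ≤ r) (by omega : (0:Int) ≤ s)]
    have e1 : (2 * x + r).toNat = 2 * x.toNat + r.toNat := by omega
    have e2 : (2 * y + s).toNat = 2 * y.toNat + s.toNat := by omega
    rw [e1, e2, pvNatLor2 _ _ _ _ (by omega) (by omega)]
    omega
  · rw [pvBorPN _ _ (by omega) (by omega), pvBorPN x y hx hy,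
        PySem.Int.bor_of_nonneg (by omega : (0:Int) ≤ r) (by omega : (0:Int) ≤ s)]
    have e1 : (2 * x + r).toNat = 2 * x.toNat + r.toNat := by omega
    have e2 : (-(2 * y + s) - 1).toNat = 2 * (-y - 1).toNat + (1 - s).toNat := by omega
    rw [e1, e2, pvNatLand2 _ _ _ _ (by omega) (by omega)]
    have := hll (-y - 1).toNat x.toNat
    have hbits : (1 - s).toNat - ((1 - s).toNat &&& r.toNat) = 1 - (r.toNat ||| s.toNat) := by
      rcases hr with rfl | rfl <;> rcases hs with rfl | rfl <;> decide
    have := hll (1 - s).toNat r.toNat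
    omega
  · rw [pvBorNP _ _ (by omega) (by omega), pvBorNP x y hx hy,
        PySem.Int.bor_of_nonneg (by omega : (0:Int) ≤ r) (by omega : (0:Int) ≤ s)]
    have e1 : (2 * y + s).toNat = 2 * y.toNat + s.toNat := by omega
    have e2 : (-(2 * x + r) - 1).toNat = 2 * (-x - 1).toNat + (1 - r).toNat := by omega
    rw [e1, e2, pvNatLand2 _ _ _ _ (by omega) (by omega)]
    have := hll (-x - 1).toNat y.toNat
    have hbits : (1 - r).toNat - ((1 - r).toNat &&& s.toNat) = 1 - (r.toNat ||| s.toNat) := by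
      rcases hr with rfl | rfl <;> rcases hs with rfl | rfl <;> decide
    have := hll (1 - r).toNat s.toNat
    omega
  · rw [pvBorNN _ _ (by omega) (by omega), pvBorNN x y hx hy,
        PySem.Int.bor_of_nonneg (by omega : (0:Int) ≤ r) (by omega : (0:Int) ≤ s)]
    have e1 : (-(2 * x + r) - 1).toNat = 2 * (-x - 1).toNat + (1 - r).toNat := by omega
    have e2 : (-(2 * y + s) - 1).toNat = 2 * (-y - 1).toNat + (1 - s).toNat := by omega
    rw [e1, e2, pvNatLand2 _ _ _ _ (by omega) (by omega)]
    have hbits : ((1 - r).toNat &&& (1 - s).toNat) = 1 - (r.toNat ||| s.toNat) := by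
      rcases hr with rfl | rfl <;> rcases hs with rfl | rfl <;> decide
    omega

-- s.replace(x, y) for single characters is a character map
theorem pvReplaceGoSingle (x y : Char) (l acc : List Char) (fuel : Nat) (h : l.length ≤ fuel) :
    PySem.Chars.replace.go [x] [y] fuel l acc
      = acc.reverse ++ l.map (fun c => if c = x then y else c) := by
  induction l generalizing fuel acc with
  | nil => cases fuel <;> simp [PySem.Chars.replace.go]
  | cons c t ih =>
    cases fuel with
    | zero => simp at h
    | succ f =>
      by_cases hc : c = x
      · subst hc
        simp [PySem.Chars.replace.go, List.isPrefixOf, ih _ _ (by simpa using h)]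
      · simp [PySem.Chars.replace.go, List.isPrefixOf, hc,
          ih _ _ (by simpa using h), Ne.symm hc]

theorem pvReplaceSingle (x y : Char) (cs : List Char) :
    PySem.Chars.replace cs [x] [y] = cs.map (fun c => if c = x then y else c) := by
  rw [PySem.Chars.replace]
  simp [pvReplaceGoSingle x y cs [] cs.length le_rfl]

-- scaling invariant of B's inner loop
theorem pvWriteScale (r : List Char) (v res p : Int) :
    (r.foldl pvWriteStep (v, res, p)).2.1
      = res + p * (r.foldl pvWriteStep (v, 0, 1)).2.1 := by
  induction r generalizing v res p with
  | nil => simp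
  | cons m t ih =>
    simp only [List.foldl_cons, pvWriteStep]
    rw [ih, ih ((PySem.Int.divmod? v 2).getD (0, 0)).1
          (0 + (if m ≠ 'X' then (PySem.Int.ofStr? (String.ofList [m])).getD 0
                else ((PySem.Int.divmod? v 2).getD (0, 0)).2) * 1) (1 * 2)]
    ring

-- the per-write core: A's (v | or_mask) & and_mask equals B's bit walk
theorem pvWriteEq (rcs : List Char) (h : ∀ c ∈ rcs, c = '0' ∨ c = '1' ∨ c = 'X') (v : Int) :
    PySem.Int.band
      (PySem.Int.bor v ((rcs.reverse.map (fun c => if c = 'X' then '0' else c)).foldl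
        (fun a c => 2 * a + (if c == '1' then 1 else 0)) 0))
      ((rcs.reverse.map (fun c => if c = 'X' then '1' else c)).foldl
        (fun a c => 2 * a + (if c == '1' then 1 else 0)) 0)
      = (rcs.foldl pvWriteStep (v, 0, 1)).2.1 := by
  induction rcs generalizing v with
  | nil =>
    simp [PySem.Int.band, PySem.Int.bor]
  | cons m rr ih =>
    have hm := h m (by simp)
    have hrr : ∀ c ∈ rr, c = '0' ∨ c = '1' ∨ c = 'X' := fun c hc => h c (by simp [hc])
    -- decompose v into its low bit and the rest
    have hv : v = 2 * PySem.Int.floordiv v 2 + PySem.Int.mod v 2 := by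
      have := PySem.Int.floordiv_mul_add_mod v 2
      omega
    have hu : PySem.Int.mod v 2 = 0 ∨ PySem.Int.mod v 2 = 1 := by
      have h1 := PySem.Int.mod_nonneg v (b := 2) (by omega)
      have h2 := PySem.Int.mod_lt v (b := 2) (by omega)
      omega
    -- B side: peel the first (lowest) mask character, then rescale
    have hstep : pvWriteStep (v, 0, 1) m
        = (PySem.Int.floordiv v 2,
           0 + (if m ≠ 'X' then (PySem.Int.ofStr? (String.ofList [m])).getD 0
                else PySem.Int.mod v 2) * 1, 1 * 2) := rfl
    simp only [List.reverse_cons, List.map_append, List.foldl_append, List.map_cons,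
      List.map_nil, List.foldl_cons, List.foldl_nil]
    rw [hstep, pvWriteScale]
    rcases hm with rfl | rfl | rfl <;>
      simp only [Char.reduceEq, Char.reduceBEq, ne_eq, not_false_eq_true,
        Bool.false_eq_true, ite_true, ite_false]
    · -- m = '0'
      conv_lhs => rw [hv]
      rw [pvBor2 _ _ _ _ hu (Or.inl rfl), pvBand2 _ _ _ _
            (by rcases hu with h' | h' <;> rw [h'] <;> decide) (Or.inl rfl), ih hrr]
      rcases hu with h' | h' <;> rw [h'] <;>
        norm_num [PySem.Int.band, PySem.Int.bor,
          show (PySem.Int.ofChars? ['1']).getD 0 = (1:Int) from by decide,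
          show (PySem.Int.ofChars? ['0']).getD 0 = (0:Int) from by decide]
    · -- m = '1'
      conv_lhs => rw [hv]
      rw [pvBor2 _ _ _ _ hu (Or.inr rfl), pvBand2 _ _ _ _
            (by rcases hu with h' | h' <;> rw [h'] <;> decide) (Or.inr rfl), ih hrr]
      rcases hu with h' | h' <;> rw [h'] <;>
        (norm_num [PySem.Int.band, PySem.Int.bor,
          show (PySem.Int.ofChars? ['1']).getD 0 = (1:Int) from by decide,
          show (PySem.Int.ofChars? ['0']).getD 0 = (0:Int) from by decide]; ring)
    · -- m = 'X'
      conv_lhs => rw [hv]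
      rw [pvBor2 _ _ _ _ hu (Or.inl rfl), pvBand2 _ _ _ _
            (by rcases hu with h' | h' <;> rw [h'] <;> decide) (Or.inr rfl), ih hrr]
      rcases hu with h' | h' <;> rw [h'] <;>
        norm_num [PySem.Int.band, PySem.Int.bor,
          show (PySem.Int.ofChars? ['1']).getD 0 = (1:Int) from by decide,
          show (PySem.Int.ofChars? ['0']).getD 0 = (0:Int) from by decide]; ring

-- the outer loop invariant

theorem pvMain (prog : List (List String)) (memA memB : PySem.Dict Int Int)
    (o a : Int) (mask : String)
    (hpre : ∀ instr ∈ prog, 2 ≤ instr.length ∧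
      (if instr.headD "" = "mask"
       then (instr.getD 1 "").toList ≠ [] ∧
            (instr.getD 1 "").toList.all (fun c => c == '0' || c == '1' || c == 'X') = true
       else 3 ≤ instr.length ∧ (PySem.Int.ofStr? (instr.getD 1 "")).isSome ∧
            (PySem.Int.ofStr? (instr.getD 2 "")).isSome))
    (hmem : memA = memB)
    (hmask : ∀ c ∈ mask.toList, c = '0' ∨ c = '1' ∨ c = 'X')
    (ho : o = pvParseBin (PySem.Str.replace mask "X" "0"))
    (ha : a = pvParseBin (PySem.Str.replace mask "X" "1")) :
    (prog.foldl pvStepA (memA, o, a)).1 = (prog.foldl pvStepB (memB, mask)).1 := by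
  induction prog generalizing memA memB o a mask with
  | nil => simpa using hmem
  | cons instr rest ih =>
    obtain ⟨hlen, hinstr⟩ := hpre instr (by simp)
    have hrest : ∀ i ∈ rest, 2 ≤ i.length ∧
        (if i.headD "" = "mask"
         then (i.getD 1 "").toList ≠ [] ∧
              (i.getD 1 "").toList.all (fun c => c == '0' || c == '1' || c == 'X') = true
         else 3 ≤ i.length ∧ (PySem.Int.ofStr? (i.getD 1 "")).isSome ∧
              (PySem.Int.ofStr? (i.getD 2 "")).isSome) := fun i hi => hpre i (by simp [hi])
    match instr, hlen with
    | i0 :: i1 :: irest, _ =>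
      simp only [List.foldl_cons]
      by_cases h0 : i0 = "mask"
      · -- mask instruction: both sides store the new mask (A as parsed ints, B as the string)
        rw [List.headD_cons, if_pos h0] at hinstr
        have hA : pvStepA (memA, o, a) (i0 :: i1 :: irest)
            = (memA, pvParseBin (PySem.Str.replace i1 "X" "0"),
               pvParseBin (PySem.Str.replace i1 "X" "1")) := by
          simp [pvStepA, pysem, h0]
        have hB : pvStepB (memB, mask) (i0 :: i1 :: irest) = (memB, i1) := by
          simp [pvStepB, pysem, h0]
        rw [hA, hB]
        refine ih memA memB _ _ i1 hrest hmem ?_ rfl rfl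
        have h2 : ∀ x ∈ i1.toList, (x = '0' ∨ x = '1') ∨ x = 'X' := by simpa using hinstr.2
        intro c hc
        rcases h2 c hc with (h | h) | h <;> tauto
      · -- write instruction: same address and value, equal stored results
        rw [List.headD_cons, if_neg h0] at hinstr
        match irest, hinstr.1 with
        | i2 :: irest', _ =>
          have hA : pvStepA (memA, o, a) (i0 :: i1 :: i2 :: irest')
              = (memA.insert ((PySem.Int.ofStr? i1).getD 0)
                  (PySem.Int.band (PySem.Int.bor ((PySem.Int.ofStr? i2).getD 0) o) a), o, a) := by
            simp [pvStepA, pysem, h0]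
          have hB : pvStepB (memB, mask) (i0 :: i1 :: i2 :: irest')
              = (memB.insert ((PySem.Int.ofStr? i1).getD 0)
                  (pvApplyMask mask ((PySem.Int.ofStr? i2).getD 0)), mask) := by
            simp [pvStepB, pysem, h0]
          have hwrite : PySem.Int.band (PySem.Int.bor ((PySem.Int.ofStr? i2).getD 0) o) a
              = pvApplyMask mask ((PySem.Int.ofStr? i2).getD 0) := by
            have hrev : ∀ c ∈ mask.toList.reverse, c = '0' ∨ c = '1' ∨ c = 'X' := by
              intro c hc; exact hmask c (List.mem_reverse.mp hc)
            have hkey := pvWriteEq mask.toList.reverse hrev ((PySem.Int.ofStr? i2).getD 0)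
            rw [List.reverse_reverse] at hkey
            rw [ho, ha]
            unfold pvParseBin pvApplyMask
            rw [PySem.Str.toList_replace, PySem.Str.toList_replace]
            have hx0 : ("X" : String).toList = ['X'] := by decide
            have h00 : ("0" : String).toList = ['0'] := by decide
            have h11 : ("1" : String).toList = ['1'] := by decide
            rw [hx0, h00, h11, pvReplaceSingle, pvReplaceSingle]
            exact hkey
          rw [hA, hB, hwrite, hmem]
          exact ih _ _ _ _ _ hrest rfl hmask ho ha

-- initial-state facts: A's (0, 2^36 - 1) is B's all-'X' mask, parsed
theorem pvInitGood : ∀ c ∈ (String.ofList (List.replicate 36 'X')).toList, c = '0' ∨ c = '1' ∨ c = 'X' := by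
  simp

set_option maxRecDepth 8192 in
theorem pvInitOr :
    (0 : Int) = pvParseBin (PySem.Str.replace (String.ofList (List.replicate 36 'X')) "X" "0") := by
  decide

set_option maxRecDepth 8192 in
theorem pvInitAnd :
    ((1 : Int) <<< (36 : Nat)) - 1
      = pvParseBin (PySem.Str.replace (String.ofList (List.replicate 36 'X')) "X" "1") := by
  have h : pvParseBin (PySem.Str.replace (String.ofList (List.replicate 36 'X')) "X" "1")
      = 68719476735 := by decide
  rw [h, Int.shiftLeft_eq]; norm_num

-- ===== VERDICT (by name: the statement is the Claim_ definition above) =====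
theorem run_v1_spec : Claim_equal_run_v1 := by
  intro program _ hpre
  unfold Spec_run_v1 run_v1 run_v1_alt
  rw [pvMain program PySem.Dict.empty PySem.Dict.empty 0 (((1 : Int) <<< (36 : Nat)) - 1)
      (String.ofList (List.replicate 36 'X')) hpre rfl pvInitGood pvInitOr pvInitAnd]
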